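-- pv_equiv track=rewrite | github.com/Aurelius10/kattisTasks | hard/completed/0_1sequence/test1.py | zeroOne
-- ===== SOURCE A (Python) =====
-- def add(x):
--     return int((x+1)*x/2)
--
-- def zeroOne(tekst):
--     counter=0
--     summer=0
--     for i in range(len(tekst)):
--         if tekst[i]=="0":
--             counter+=1
--             summer+=i+1
--     return summer - add(counter)
-- ===== SOURCE B (Python) =====
-- def zeroOne(tekst):
--     before = 0
--     total = 0
--     for ch in tekst:
--         if ch == "0":
--             total += before
--         else:
--             before += 1
--     return total
-- ===== Notes on version B (the rewrite author's own statement) =====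
-- stated objective: simpler
-- what changed: Instead of summing 1-based positions of '0's and subtracting the triangular number of the zero count via a helper, B makes one pass keeping a count of non-'0' characters seen and adds that count at each '0'.
import Mathlib
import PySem

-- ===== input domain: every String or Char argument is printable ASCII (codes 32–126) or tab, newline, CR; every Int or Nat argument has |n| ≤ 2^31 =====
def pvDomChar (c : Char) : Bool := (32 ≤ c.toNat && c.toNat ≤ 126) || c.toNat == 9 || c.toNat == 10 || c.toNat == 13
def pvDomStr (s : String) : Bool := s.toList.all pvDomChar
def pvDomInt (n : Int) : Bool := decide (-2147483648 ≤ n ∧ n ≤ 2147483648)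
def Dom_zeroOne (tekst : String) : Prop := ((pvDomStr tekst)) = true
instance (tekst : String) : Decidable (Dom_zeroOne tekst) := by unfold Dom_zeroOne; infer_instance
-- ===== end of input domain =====

-- B is a simpler single accumulation (count of non-'0' chars added at each '0'); no helper, no closed form.

-- ===== PORT A =====
-- Python: int((x+1)*x/2); (x+1)*x is even and nonnegative here, so exact integer halving
def addA (x : Int) : Int := ((x + 1) * x) / 2

-- for i in range(len(tekst)): iterate the characters with an index accumulator
def zeroOne (tekst : String) : Int :=
  let st := tekst.toList.foldl
    (fun (st : Int × Int × Int) c =>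
      let (i, counter, summer) := st
      if c == '0' then (i + 1, counter + 1, summer + i + 1) else (i + 1, counter, summer))
    (0, 0, 0)
  st.2.2 - addA st.2.1

-- ===== PORT B =====
def zeroOne_alt (tekst : String) : Int :=
  let st := tekst.toList.foldl
    (fun (st : Int × Int) c =>
      if c == '0' then (st.1, st.2 + st.1) else (st.1 + 1, st.2))
    (0, 0)
  st.2

-- ===== PRECONDITION & SPEC =====
def Spec_zeroOne (tekst : String) (out : Int) : Prop := out = zeroOne_alt tekst
instance (tekst : String) (out : Int) : Decidable (Spec_zeroOne tekst out) := by unfold Spec_zeroOne; infer_instance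

-- ===== CLAIM (what is proved, stated in full; the proofs are below) =====
def Claim_equal_zeroOne : Prop := ∀ (tekst : String), Dom_zeroOne tekst → Spec_zeroOne tekst (zeroOne tekst)

-- ===== LEMMAS AND PROOFS =====

theorem zeroOne_inv (l : List Char) (i counter summer before total : Int)
    (hc : 0 ≤ counter) (hb : before = i - counter) (ht : total = summer - addA counter) :
    ((l.foldl
        (fun (st : Int × Int × Int) c =>
          let (i, counter, summer) := st
          if c == '0' then (i + 1, counter + 1, summer + i + 1) else (i + 1, counter, summer))
        (i, counter, summer)).2.2 -
      addA (l.foldl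
        (fun (st : Int × Int × Int) c =>
          let (i, counter, summer) := st
          if c == '0' then (i + 1, counter + 1, summer + i + 1) else (i + 1, counter, summer))
        (i, counter, summer)).2.1) =
    (l.foldl
        (fun (st : Int × Int) c =>
          if c == '0' then (st.1, st.2 + st.1) else (st.1 + 1, st.2))
        (before, total)).2 := by
  induction l generalizing i counter summer before total with
  | nil =>
    simp only [List.foldl_nil]
    omega
  | cons c rest ih =>
    simp only [List.foldl_cons]
    by_cases h : c == '0'
    · simp only [h, if_pos]
      exact ih (i + 1) (counter + 1) (summer + i + 1) before (total + before)
        (by omega) (by omega)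
        (by
          simp only [addA] at ht ⊢
          have hr : (counter + 1 + 1) * (counter + 1)
              = (counter + 1) * counter + 2 * (counter + 1) := by ring
          have he : (counter + 1) * counter % 2 = 0 := by
            have := Int.even_mul_succ_self counter
            rw [mul_comm] at this
            exact Int.even_iff.mp this
          omega)
    · simp only [h, if_neg, Bool.false_eq_true, not_false_iff]
      exact ih (i + 1) counter summer (before + 1) total (by omega) (by omega) ht

-- ===== VERDICT (by name: the statement is the Claim_ definition above) =====
theorem zeroOne_spec : Claim_equal_zeroOne := by
  intro tekst _
  unfold Spec_zeroOne zeroOne zeroOne_alt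
  exact zeroOne_inv tekst.toList 0 0 0 0 0 le_rfl (by ring) (by simp [addA])
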